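-- pv_equiv track=rewrite | github.com/neek88/General | hdl_programming/VHDL modules/FIR_Filter/FIR_filter_simulation/sig_util.py | gen_boc_code
-- ===== SOURCE A (Python) =====
-- def gen_boc_code(boc_phase, boc_chip_number, boc_sample_factor):
--     # generate boc +1/ -1 signal
--     boc_l = []
--     for i in range(boc_chip_number):
--         if(boc_phase == 0):     # sin phase (start at -1)
--             if(i % 2 == 0):
--                 boc_l.append(-1)
--             else:
--                 boc_l.append(1)
--         else:                   # cosine phase (start at +1)
--             if(i % 2 == 0):
--                 boc_l.append(1)
--             else:
--                 boc_l.append(-1)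
--     # stretch by boc_sample_factor
--     boc = []
--     for i in boc_l:
--         for j in range(int(boc_sample_factor)):
--             boc.append(i)
--     return boc
-- ===== SOURCE B (Python) =====
-- def gen_boc_code(boc_phase, boc_chip_number, boc_sample_factor):
--     # single pass: element i belongs to chip i // sf; value from chip parity
--     sf = int(boc_sample_factor)
--     if boc_chip_number <= 0 or sf <= 0:
--         return []
--     total = boc_chip_number * sf
--     if boc_phase == 0:
--         return [-1 if (i // sf) % 2 == 0 else 1 for i in range(total)]
--     return [1 if (i // sf) % 2 == 0 else -1 for i in range(total)]
-- ===== Notes on version B (the rewrite author's own statement) =====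
-- stated objective: simpler
-- what changed: Replaces A's two-stage build (chip list, then a nested stretch loop appending each chip sf times) with a single comprehension over range(boc_chip_number*sf) that derives each element directly from (i // sf) % 2.
import Mathlib
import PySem

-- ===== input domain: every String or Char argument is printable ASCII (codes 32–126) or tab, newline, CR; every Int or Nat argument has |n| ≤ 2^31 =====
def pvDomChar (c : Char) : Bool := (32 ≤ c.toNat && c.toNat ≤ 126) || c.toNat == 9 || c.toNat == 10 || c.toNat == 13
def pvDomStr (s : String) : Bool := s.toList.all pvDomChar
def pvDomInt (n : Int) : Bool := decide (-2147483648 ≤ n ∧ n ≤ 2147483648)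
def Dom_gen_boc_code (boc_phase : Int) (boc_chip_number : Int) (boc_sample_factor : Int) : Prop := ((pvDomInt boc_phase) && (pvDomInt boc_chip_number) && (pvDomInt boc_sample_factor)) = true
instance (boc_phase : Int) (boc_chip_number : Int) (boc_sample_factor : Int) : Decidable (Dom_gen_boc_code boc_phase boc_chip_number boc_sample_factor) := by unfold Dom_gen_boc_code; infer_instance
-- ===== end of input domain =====

-- B builds the output in a single pass over range(n*sf), deriving each element from (i // sf) % 2,
-- instead of A's chip list followed by a nested stretch loop: simpler decomposition, same cost.


-- ===== PORT A =====
def gen_boc_code (boc_phase : Int) (boc_chip_number : Int) (boc_sample_factor : Int) : List Int :=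
  -- boc_l: chip values, branch order as in A
  let boc_l : List Int := (PySem.List.pyRange 0 boc_chip_number 1).foldl (fun acc i =>
    if boc_phase = 0 then
      (if PySem.Int.mod i 2 = 0 then acc ++ [-1] else acc ++ [1])
    else
      (if PySem.Int.mod i 2 = 0 then acc ++ [1] else acc ++ [-1])) []
  -- stretch by boc_sample_factor (int() is the identity on an int)
  boc_l.foldl (fun boc i =>
    (PySem.List.pyRange 0 boc_sample_factor 1).foldl (fun boc _ => boc ++ [i]) boc) []

-- ===== PORT B =====
def gen_boc_code_alt (boc_phase : Int) (boc_chip_number : Int) (boc_sample_factor : Int) : List Int :=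
  let sf := boc_sample_factor
  if boc_chip_number ≤ 0 ∨ sf ≤ 0 then []
  else if boc_phase = 0 then
    (PySem.List.pyRange 0 (boc_chip_number * sf) 1).map (fun i =>
      if PySem.Int.mod (PySem.Int.floordiv i sf) 2 = 0 then -1 else 1)
  else
    (PySem.List.pyRange 0 (boc_chip_number * sf) 1).map (fun i =>
      if PySem.Int.mod (PySem.Int.floordiv i sf) 2 = 0 then 1 else -1)

-- ===== PRECONDITION & SPEC =====
def Spec_gen_boc_code (boc_phase : Int) (boc_chip_number : Int) (boc_sample_factor : Int) (out : List Int) : Prop := out = gen_boc_code_alt boc_phase boc_chip_number boc_sample_factor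
instance (boc_phase : Int) (boc_chip_number : Int) (boc_sample_factor : Int) (out : List Int) : Decidable (Spec_gen_boc_code boc_phase boc_chip_number boc_sample_factor out) := by unfold Spec_gen_boc_code; infer_instance

-- ===== CLAIM (what is proved, stated in full; the proofs are below) =====
def Claim_equal_gen_boc_code : Prop := ∀ (boc_phase : Int) (boc_chip_number : Int) (boc_sample_factor : Int), Dom_gen_boc_code boc_phase boc_chip_number boc_sample_factor → Spec_gen_boc_code boc_phase boc_chip_number boc_sample_factor (gen_boc_code boc_phase boc_chip_number boc_sample_factor)

-- ===== LEMMAS AND PROOFS =====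

-- the inner stretch loop appends one copy of i per range element
theorem foldl_append_const {α β : Type} (x : α) :
    ∀ (l : List β) (acc : List α), l.foldl (fun a _ => a ++ [x]) acc = acc ++ List.replicate l.length x := by
  intro l
  induction l with
  | nil => simp [List.foldl]
  | cons b bs ih =>
    intro acc
    simp [List.foldl, ih, List.replicate_succ, List.append_assoc]

-- chip value as a function of the chip index (proof-side helper)
def pvChip (p : Int) (c : Nat) : Int :=
  if p = 0 then (if c % 2 = 0 then -1 else 1) else (if c % 2 = 0 then 1 else -1)

-- A's first loop is a map of the chip-value function
theorem boc_l_eq_map (p : Int) :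
    ∀ (l : List Int) (acc : List Int),
      l.foldl (fun acc i =>
        if p = 0 then
          (if PySem.Int.mod i 2 = 0 then acc ++ [-1] else acc ++ [1])
        else
          (if PySem.Int.mod i 2 = 0 then acc ++ [1] else acc ++ [-1])) acc
      = acc ++ l.map (fun i =>
          if p = 0 then
            (if PySem.Int.mod i 2 = 0 then -1 else 1)
          else
            (if PySem.Int.mod i 2 = 0 then 1 else -1)) := by
  intro l
  induction l with
  | nil => simp [List.foldl]
  | cons b bs ih =>
    intro acc
    simp only [List.foldl_cons, List.map_cons, ih]
    split_ifs <;> simp [List.append_assoc]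

-- core identity over Nat: flatMap-replicate of the chip list = single pass indexed by i / S
theorem flat_eq_single (F : Nat → Int) (S : Nat) :
    ∀ (N : Nat), (List.range N).flatMap (fun c => List.replicate S (F c))
      = (List.range (N * S)).map (fun i => F (i / S)) := by
  intro N
  induction N with
  | zero => simp
  | succ n ih =>
    have hrange : List.range ((n + 1) * S) = List.range (n * S) ++ (List.range S).map (fun j => n * S + j) := by
      have : (n + 1) * S = n * S + S := by ring
      rw [this, List.range_add]
    rw [List.range_succ, List.flatMap_append, ih, hrange, List.map_append, List.map_map]
    congr 1
    simp only [List.flatMap_cons, List.flatMap_nil, List.append_nil]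
    rcases Nat.eq_zero_or_pos S with hS | hS
    · simp [hS]
    · symm
      have h : ∀ j ∈ List.range S, ((fun i => F (i / S)) ∘ fun j => n * S + j) j = F n := by
        intro j hj
        have hj' : j < S := List.mem_range.mp hj
        have hdiv : (n * S + j) / S = n := by
          rw [Nat.mul_comm, Nat.mul_add_div hS]
          simp [Nat.div_eq_of_lt hj']
        simp [Function.comp, hdiv]
      rw [List.map_congr_left h, List.map_const', List.length_range]

theorem gen_boc_code_spec : Claim_equal_gen_boc_code := by
  intro p n s _
  unfold Spec_gen_boc_code gen_boc_code gen_boc_code_alt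
  by_cases hn : n ≤ 0
  · have h1 : PySem.List.pyRange 0 n 1 = [] := by
      simp [PySem.List.pyRange]; omega
    simp [h1, if_pos (Or.inl hn)]
  · by_cases hs : s ≤ 0
    · have h2 : PySem.List.pyRange 0 s 1 = [] := by
        simp [PySem.List.pyRange]; omega
      simp [h2, if_pos (Or.inr hs), List.foldl_fixed]
    · -- positive chip count and sample factor
      simp only [not_le] at hn hs
      obtain ⟨N, rfl⟩ : ∃ N : Nat, n = (N : Int) := ⟨n.toNat, by omega⟩
      obtain ⟨S, rfl⟩ : ∃ S : Nat, s = (S : Int) := ⟨s.toNat, by omega⟩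
      have hguard : ¬((N : Int) ≤ 0 ∨ (S : Int) ≤ 0) := by simp only [not_or, not_le]; exact ⟨hn, hs⟩
      rw [if_neg hguard]
      have hlen : (PySem.List.pyRange 0 (S : Int) 1).length = S := by
        rw [PySem.List.pyRange_zero_natCast]; simp
      have hNS : (N : Int) * (S : Int) = ((N * S : Nat) : Int) := by push_cast; ring
      simp only [boc_l_eq_map, List.nil_append, foldl_append_const,
        PySem.List.foldl_append_eq_flatMap, hNS, PySem.List.pyRange_zero_natCast,
        List.flatMap_map, List.map_map, Function.comp, List.length_map, List.length_range]
      by_cases hp : p = 0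
      · subst hp
        simp only [if_true]
        have hL : (fun c : Nat => List.replicate S (if PySem.Int.mod (c : Int) 2 = 0 then (-1 : Int) else 1))
            = fun c : Nat => List.replicate S (if c % 2 = 0 then (-1 : Int) else 1) := by
          funext c
          by_cases h : c % 2 = 0 <;> simp [h] <;> omega
        rw [hL, flat_eq_single (fun c => if c % 2 = 0 then (-1 : Int) else 1) S N]
        apply List.map_congr_left
        intro i _
        simp only [Function.comp]
        rw [PySem.Int.floordiv_natCast]
        by_cases h : (i / S) % 2 = 0 <;> simp [h] <;> omega
      · simp only [if_neg hp]
        have hL : (fun c : Nat => List.replicate S (if PySem.Int.mod (c : Int) 2 = 0 then (1 : Int) else -1))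
            = fun c : Nat => List.replicate S (if c % 2 = 0 then (1 : Int) else -1) := by
          funext c
          by_cases h : c % 2 = 0 <;> simp [h] <;> omega
        rw [hL, flat_eq_single (fun c => if c % 2 = 0 then (1 : Int) else -1) S N]
        apply List.map_congr_left
        intro i _
        simp only [Function.comp]
        rw [PySem.Int.floordiv_natCast]
        by_cases h : (i / S) % 2 = 0 <;> simp [h] <;> omega
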